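-- pv_equiv track=rewrite | github.com/ParthTagalpallewar/Ds-And-Algo-Python | List/Practise_Questions/PossibleCombinations.py | combo
-- ===== SOURCE A (Python) =====
-- def combo(line):
--     b =[]
--     one_line = list(line)
--     for i in range(len(line)):
--         for i in range(len(line)-1):
--             one_line[i], one_line[i + 1] = one_line[i + 1] , one_line[i]
--             b.append("".join(one_line))
--     return b
-- ===== SOURCE B (Python) =====
-- def _pass(base, n):
--     # after j adjacent swaps a pass's list equals base[1:j+1] + base[:1] + base[j+1:]
--     return ["".join(base[1:j + 1] + base[:1] + base[j + 1:]) for j in range(1, n)]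
--
--
-- def combo(line):
--     lst = list(line)
--     n = len(lst)
--     return [s for p in range(n) for s in _pass(lst[p:] + lst[:p], n)]
-- ===== Notes on version B (the rewrite author's own statement) =====
-- stated objective: alternative
-- what changed: B keeps no running mutated list: it derives each emitted string in closed form by slicing (each full inner pass is a left-rotation by one, and after j swaps the list is base[1:j+1]+base[:1]+base[j+1:]), instead of A's incremental in-place adjacent swaps.
import Mathlib
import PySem

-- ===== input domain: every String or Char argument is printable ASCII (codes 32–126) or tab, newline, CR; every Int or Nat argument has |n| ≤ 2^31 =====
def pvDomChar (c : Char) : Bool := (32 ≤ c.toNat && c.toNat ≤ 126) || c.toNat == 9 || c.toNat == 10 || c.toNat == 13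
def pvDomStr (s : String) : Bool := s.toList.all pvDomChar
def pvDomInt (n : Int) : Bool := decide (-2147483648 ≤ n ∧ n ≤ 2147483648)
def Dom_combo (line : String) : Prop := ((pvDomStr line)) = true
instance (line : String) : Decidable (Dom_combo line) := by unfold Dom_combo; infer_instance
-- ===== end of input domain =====

-- B replaces A's running mutated list by closed-form slices of a rotation; objective: alternative (same cost).

-- ===== PORT A =====
-- one_line[i], one_line[i+1] = one_line[i+1], one_line[i]  (exact for 0 ≤ i < len-1, the only indices A uses)
def pvSwapAdj : List Char → Nat → List Char
  | a :: b :: t, 0 => b :: a :: t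
  | a :: t, n + 1 => a :: pvSwapAdj t n
  | l, _ => l

def combo (line : String) : List String :=
  let one_line := line.toList
  let st :=
    (PySem.List.pyRange 0 (Int.ofNat line.toList.length) 1).foldl
      (fun (st : List String × List Char) _ =>
        (PySem.List.pyRange 0 (Int.ofNat line.toList.length - 1) 1).foldl
          (fun (st : List String × List Char) i =>
            (st.1 ++ [String.mk (pvSwapAdj st.2 i.toNat)], pvSwapAdj st.2 i.toNat)) st)
      (([] : List String), one_line)
  st.1

-- ===== PORT B =====
-- "".join(base[1:j+1] + base[:1] + base[j+1:]) for j in range(1, n)   (here j = j0 + 1)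
def pvPass (base : List Char) (n : Nat) : List String :=
  (List.range (n - 1)).map (fun j0 =>
    String.mk ((base.take (j0 + 2)).drop 1 ++ base.take 1 ++ base.drop (j0 + 2)))

def combo_alt (line : String) : List String :=
  let lst := line.toList
  let n := lst.length
  ((List.range n).map (fun p => pvPass (lst.drop p ++ lst.take p) n)).flatten

-- ===== PRECONDITION & SPEC =====
def Spec_combo (line : String) (out : List String) : Prop := out = combo_alt line
instance (line : String) (out : List String) : Decidable (Spec_combo line out) := by unfold Spec_combo; infer_instance

-- ===== CLAIM (what is proved, stated in full; the proofs are below) =====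
def Claim_equal_combo : Prop := ∀ (line : String), Dom_combo line → Spec_combo line (combo line)

-- ===== LEMMAS AND PROOFS =====

theorem pvSwapAdj_at (u : List Char) (a b : Char) (t : List Char) :
    pvSwapAdj (u ++ a :: b :: t) u.length = u ++ b :: a :: t := by
  induction u with
  | nil => rfl
  | cons x u ih => simp [pvSwapAdj, ih]

-- the state after j adjacent swaps of a pass starting from x :: r
def pvState (x : Char) (r : List Char) (j : Nat) : List Char :=
  r.take j ++ x :: r.drop j

theorem pvState_swap (x : Char) (r : List Char) (j : Nat) (hj : j < r.length) :
    pvSwapAdj (pvState x r j) j = pvState x r (j + 1) := by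
  have hdrop : r.drop j = r[j] :: r.drop (j + 1) := (List.getElem_cons_drop hj).symm
  have htake : r.take (j + 1) = r.take j ++ [r[j]] := by
    rw [List.take_succ, List.getElem?_eq_getElem hj]; rfl
  have hlen : (r.take j).length = j := List.length_take_of_le (le_of_lt hj)
  calc pvSwapAdj (pvState x r j) j
      = pvSwapAdj (r.take j ++ x :: r[j] :: r.drop (j + 1)) (r.take j).length := by
        rw [pvState, hdrop, hlen]
    _ = r.take j ++ r[j] :: x :: r.drop (j + 1) := pvSwapAdj_at _ _ _ _
    _ = pvState x r (j + 1) := by rw [pvState, htake, List.append_assoc]; rfl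

-- one inner pass, unrolled from swap number j onward
theorem pvInner (x : Char) (r : List Char) (m j : Nat) (hm : j + m = r.length)
    (acc : List String) :
    (List.range' j m).foldl
      (fun (st : List String × List Char) (i : Nat) =>
        (st.1 ++ [String.mk (pvSwapAdj st.2 i)], pvSwapAdj st.2 i)) (acc, pvState x r j)
    = (acc ++ (List.range' j m).map (fun i => String.mk (pvState x r (i + 1))),
       r ++ [x]) := by
  induction m generalizing j acc with
  | zero =>
      simp at hm
      simp [pvState, hm]
  | succ m ih =>
      have hj : j < r.length := by omega
      rw [List.range'_succ]
      simp only [List.foldl_cons, List.map_cons]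
      rw [pvState_swap x r j hj, ih (j + 1) (by omega)]
      simp

theorem combo_eq (line : String) : combo line = combo_alt line := by
  have key : ∀ (lst : List Char) (m p : Nat), p + m = lst.length → ∀ (acc : List String),
      ((List.range' p m).foldl
        (fun (st : List String × List Char) (_ : Nat) =>
          (List.range (lst.length - 1)).foldl
            (fun (st : List String × List Char) (i : Nat) =>
              (st.1 ++ [String.mk (pvSwapAdj st.2 i)], pvSwapAdj st.2 i)) st)
        (acc, lst.drop p ++ lst.take p)).1
      = acc ++ ((List.range' p m).map
          (fun q => pvPass (lst.drop q ++ lst.take q) lst.length)).flatten := by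
    intro lst m
    induction m with
    | zero => intro p hp acc; simp
    | succ m ih =>
        intro p hp acc
        have hp' : p < lst.length := by omega
        rw [List.range'_succ, List.foldl_cons, List.map_cons]
        have hrot : lst.drop p ++ lst.take p
            = lst[p] :: (lst.drop (p + 1) ++ lst.take p) := by
          rw [← List.getElem_cons_drop hp']; rfl
        have hrlen : (lst.drop (p + 1) ++ lst.take p).length = lst.length - 1 := by
          simp; omega
        have hstate0 : lst.drop p ++ lst.take p
            = pvState lst[p] (lst.drop (p + 1) ++ lst.take p) 0 := by
          rw [pvState]; simpa using hrot
        have hinner' := pvInner lst[p] (lst.drop (p + 1) ++ lst.take p)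
          (lst.length - 1) 0 (by omega) acc
        rw [← List.range_eq_range'] at hinner'
        rw [← hstate0] at hinner'
        rw [hinner']
        have hnext : (lst.drop (p + 1) ++ lst.take p) ++ [lst[p]]
            = lst.drop (p + 1) ++ lst.take (p + 1) := by
          rw [List.take_succ, List.getElem?_eq_getElem hp']
          simp
        rw [hnext, ih (p + 1) (by omega)]
        have hpass : (List.range (lst.length - 1)).map
            (fun i => String.mk (pvState lst[p] (lst.drop (p + 1) ++ lst.take p) (i + 1)))
            = pvPass (lst.drop p ++ lst.take p) lst.length := by
          rw [pvPass]
          refine List.map_congr_left (fun j0 hj0 => ?_)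
          rw [List.mem_range] at hj0
          congr 1
          rw [pvState, hrot]
          simp [List.take_succ_cons, List.drop_succ_cons]
        rw [hpass]
        simp
  have h0 := key line.toList line.toList.length 0 (by omega) []
  simp only [List.drop_zero, List.take_zero, List.append_nil, List.nil_append] at h0
  rw [← List.range_eq_range'] at h0
  have houter : PySem.List.pyRange 0 (line.toList.length : Int) 1
      = (List.range line.toList.length).map (fun k : Nat => (k : Int)) := by
    rw [PySem.List.pyRange_one]
    simp
  have hinner : PySem.List.pyRange 0 ((line.toList.length : Int) - 1) 1
      = (List.range (line.toList.length - 1)).map (fun k : Nat => (k : Int)) := by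
    rw [PySem.List.pyRange_one]
    have h1 : (((line.toList.length : Int)) - 1 - 0).toNat = line.toList.length - 1 := by omega
    rw [h1]
    simp
  simp only [combo, combo_alt, Int.ofNat_eq_natCast]
  rw [houter, hinner]
  simp only [List.foldl_map, Int.toNat_natCast]
  exact h0

-- ===== VERDICT (by name: the statement is the Claim_ definition above) =====
theorem combo_spec : Claim_equal_combo := by
  intro line _
  exact combo_eq line
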